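-- pv_equiv track=rewrite | github.com/benquick123/code-profiling | code/batch-2/dn5 - tviti/M-17157-2603.py | vsi_avtorji
-- ===== SOURCE A (Python) =====
-- def vsi_avtorji(tviti):
--     a = []
--     for w in tviti:
--         for b in w:
--             c = w.split()
--             for x in c:
--                 if x[-1] == ":":
--                     t = x.replace(":","")
--                     if t not in a:
--                         a.append(t)
--     return a
-- ===== SOURCE B (Python) =====
-- def vsi_avtorji(tviti):
--     matches = [x.replace(":", "")
--                for w in tviti
--                for x in w.split()
--                if x[-1] == ":"]
--     return list(dict.fromkeys(matches))
-- ===== Notes on version B (the rewrite author's own statement) =====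
-- stated objective: simpler
-- what changed: A's redundant per-character outer loop with inline membership-dedup is replaced by one flat collection pass over all words ending in ':' followed by a separate order-preserving dict.fromkeys deduplication pass.
import Mathlib
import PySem

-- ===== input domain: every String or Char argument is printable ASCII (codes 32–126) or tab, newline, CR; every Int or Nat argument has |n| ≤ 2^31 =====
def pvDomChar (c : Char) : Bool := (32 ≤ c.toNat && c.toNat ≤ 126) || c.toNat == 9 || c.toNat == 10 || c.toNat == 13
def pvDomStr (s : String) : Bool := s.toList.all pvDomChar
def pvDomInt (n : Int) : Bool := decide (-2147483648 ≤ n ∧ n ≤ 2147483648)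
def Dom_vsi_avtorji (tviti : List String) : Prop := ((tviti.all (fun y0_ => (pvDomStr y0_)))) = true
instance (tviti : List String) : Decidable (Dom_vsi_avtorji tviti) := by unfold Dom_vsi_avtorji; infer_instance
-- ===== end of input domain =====

-- B replaces A's redundant per-character loop with inline dedup by one flat
-- collection pass over the colon-terminated words followed by a separate
-- order-preserving deduplication pass (objective: simpler).


-- ===== PORT A =====
def vsi_avtorji (tviti : List String) : List String :=
  tviti.foldl (fun a w =>
    w.toList.foldl (fun a _b =>
      (PySem.Str.split₀ w).foldl (fun a x =>
        if PySem.Str.pyGet? x (-1) == some ':' then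
          let t := PySem.Str.replace x ":" ""
          if t ∈ a then a else a ++ [t]
        else a) a) a) []

-- ===== PORT B =====
-- first-occurrence-order deduplication (port of list(dict.fromkeys(...)))
def dedupKeep (xs : List String) : List String :=
  xs.foldl (fun acc t => if t ∈ acc then acc else acc ++ [t]) []

def vsi_avtorji_alt (tviti : List String) : List String :=
  dedupKeep
    (tviti.flatMap (fun w =>
      ((PySem.Str.split₀ w).filter (fun x => PySem.Str.pyGet? x (-1) == some ':')).map
        (fun x => PySem.Str.replace x ":" "")))

-- ===== PRECONDITION & SPEC =====
def Spec_vsi_avtorji (tviti : List String) (out : List String) : Prop := out = vsi_avtorji_alt tviti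
instance (tviti : List String) (out : List String) : Decidable (Spec_vsi_avtorji tviti out) := by unfold Spec_vsi_avtorji; infer_instance

-- ===== CLAIM (what is proved, stated in full; the proofs are below) =====
def Claim_equal_vsi_avtorji : Prop := ∀ (tviti : List String), Dom_vsi_avtorji tviti → Spec_vsi_avtorji tviti (vsi_avtorji tviti)

-- ===== LEMMAS AND PROOFS =====

-- the dedup step shared by both algorithms
def ddS (a : List String) (t : String) : List String := if t ∈ a then a else a ++ [t]

-- the matches contributed by one tweet
def matchesOf (w : String) : List String :=
  ((PySem.Str.split₀ w).filter (fun x => PySem.Str.pyGet? x (-1) == some ':')).map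
    (fun x => PySem.Str.replace x ":" "")

-- generic foldl congruence on list members
theorem foldl_congr_fn {α β : Type} (l : List α) (f g : β → α → β) (b : β)
    (h : ∀ x ∈ l, ∀ acc, f acc x = g acc x) : l.foldl f b = l.foldl g b := by
  induction l generalizing b with
  | nil => rfl
  | cons y ys ih =>
    simp only [List.foldl]
    rw [h y (by simp) b]
    exact ih _ (fun x hx acc => h x (by simp [hx]) acc)

-- A's inner word loop = folding ddS over the filtered-and-mapped word list
theorem wordloop_eq (c : List String) (a : List String) :
    c.foldl (fun a x =>
        if PySem.Str.pyGet? x (-1) == some ':' then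
          let t := PySem.Str.replace x ":" ""
          if t ∈ a then a else a ++ [t]
        else a) a
    = ((c.filter (fun x => PySem.Str.pyGet? x (-1) == some ':')).map
        (fun x => PySem.Str.replace x ":" "")).foldl ddS a := by
  induction c generalizing a with
  | nil => rfl
  | cons x xs ih =>
    cases h : (PySem.Str.pyGet? x (-1) == some ':') with
    | true =>
      simp only [List.foldl, List.filter_cons, h, if_pos, List.map_cons]
      rw [ih]
      rfl
    | false =>
      simp only [List.foldl, List.filter_cons, h, Bool.false_eq_true, if_false]
      rw [ih]

theorem mem_foldl_ddS_of_mem_acc (l : List String) (a : List String) (x : String)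
    (hx : x ∈ a) : x ∈ l.foldl ddS a := by
  induction l generalizing a with
  | nil => exact hx
  | cons y ys ih =>
    simp only [List.foldl]
    apply ih
    unfold ddS
    split
    · exact hx
    · exact List.mem_append_left _ hx

theorem mem_foldl_ddS_of_mem (l : List String) (a : List String) (x : String)
    (hx : x ∈ l) : x ∈ l.foldl ddS a := by
  induction l generalizing a with
  | nil => cases hx
  | cons y ys ih =>
    simp only [List.foldl]
    rcases List.mem_cons.mp hx with h | h
    · subst h
      apply mem_foldl_ddS_of_mem_acc
      unfold ddS
      split
      · assumption
      · exact List.mem_append_right _ (by simp)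
    · exact ih _ h

theorem foldl_ddS_of_subset (l : List String) (s : List String)
    (h : ∀ x ∈ l, x ∈ s) : l.foldl ddS s = s := by
  induction l with
  | nil => rfl
  | cons y ys ih =>
    have hy : y ∈ s := h y (by simp)
    simp only [List.foldl]
    rw [show ddS s y = s by unfold ddS; simp [hy]]
    exact ih (fun x hx => h x (by simp [hx]))

theorem foldl_ddS_self_idem (l : List String) (a : List String) :
    l.foldl ddS (l.foldl ddS a) = l.foldl ddS a := by
  exact foldl_ddS_of_subset _ _ (fun x hx => mem_foldl_ddS_of_mem _ _ _ hx)

-- repeating an idempotent step once per character collapses to at most one step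
theorem charloop_collapse (chars : List Char) (f : List String → List String)
    (hf : ∀ a, f (f a) = f a) (a : List String) :
    chars.foldl (fun a _ => f a) a = if chars = [] then a else f a := by
  induction chars generalizing a with
  | nil => rfl
  | cons c cs ih =>
    simp only [List.foldl, ih (f a)]
    split
    · simp
    · simp [hf]

theorem split₀_empty : PySem.Str.split₀ "" = [] := by decide

theorem tweet_step (w : String) (a : List String) :
    w.toList.foldl (fun a _b =>
      (PySem.Str.split₀ w).foldl (fun a x =>
        if PySem.Str.pyGet? x (-1) == some ':' then
          let t := PySem.Str.replace x ":" ""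
          if t ∈ a then a else a ++ [t]
        else a) a) a
    = (matchesOf w).foldl ddS a := by
  have h1 : w.toList.foldl (fun a _b =>
      (PySem.Str.split₀ w).foldl (fun a x =>
        if PySem.Str.pyGet? x (-1) == some ':' then
          let t := PySem.Str.replace x ":" ""
          if t ∈ a then a else a ++ [t]
        else a) a) a
      = w.toList.foldl (fun a _b => (matchesOf w).foldl ddS a) a := by
    apply foldl_congr_fn
    intro x _ acc
    exact wordloop_eq _ acc
  rw [h1, charloop_collapse _ _ (fun b => foldl_ddS_self_idem _ _)]
  split
  · rename_i hnil
    have hw : w = "" := by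
      have : w.toList = "".toList := by simp [hnil]
      exact String.toList_inj.mp this
    subst hw
    simp [matchesOf, split₀_empty]
  · rfl

theorem foldl_ddS_flatMap (ts : List String) (a : List String) :
    ts.foldl (fun a w => (matchesOf w).foldl ddS a) a
    = (ts.flatMap matchesOf).foldl ddS a := by
  induction ts generalizing a with
  | nil => rfl
  | cons w ws ih =>
    simp only [List.foldl, List.flatMap_cons, List.foldl_append]
    exact ih _

-- ===== VERDICT (by name: the statement is the Claim_ definition above) =====
theorem vsi_avtorji_spec : Claim_equal_vsi_avtorji := by
  intro tviti _
  unfold Spec_vsi_avtorji vsi_avtorji vsi_avtorji_alt dedupKeep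
  have h1 : tviti.foldl (fun a w =>
      w.toList.foldl (fun a _b =>
        (PySem.Str.split₀ w).foldl (fun a x =>
          if PySem.Str.pyGet? x (-1) == some ':' then
            let t := PySem.Str.replace x ":" ""
            if t ∈ a then a else a ++ [t]
          else a) a) a) []
      = tviti.foldl (fun a w => (matchesOf w).foldl ddS a) [] := by
    apply foldl_congr_fn
    intro w _ acc
    exact tweet_step w acc
  rw [h1, foldl_ddS_flatMap]
  rfl
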